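-- pv_equiv track=rewrite | github.com/danibahri/sentiment-analysis-parawisata | app.py | analyze_aspect_sentiment
-- ===== SOURCE A (Python) =====
-- def analyze_aspect_sentiment(text, aspect_keywords, positive_words, negative_words):
--     """Analisis sentimen untuk aspek tertentu"""
--     windows = []
--     words = text.split()
--
--     # Extract context windows around aspect keywords
--     for keyword in aspect_keywords:
--         if keyword in words:
--             for i, word in enumerate(words):
--                 if word == keyword:
--                     start = max(0, i-5)
--                     end = min(len(words), i+6)
--                     window = ' '.join(words[start:end])
--                     windows.append(window)
--
--     # Analyze sentiment in each context window
--     sentiments = []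
--     for window in windows:
--         window_words = window.split()
--         pos_count = sum(1 for word in window_words if word in positive_words)
--         neg_count = sum(1 for word in window_words if word in negative_words)
--
--         if pos_count > neg_count:
--             sentiments.append('positif')
--         elif neg_count > pos_count:
--             sentiments.append('negatif')
--         else:
--             sentiments.append('netral')
--
--     if not sentiments:
--         return 'netral'
--
--     # Determine overall aspect sentiment
--     pos_count = sentiments.count('positif')
--     neg_count = sentiments.count('negatif')
--     neu_count = sentiments.count('netral')
--
--     if pos_count > neg_count and pos_count >= neu_count:
--         return 'positif'
--     elif neg_count > pos_count and neg_count >= neu_count: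
--         return 'negatif'
--     else:
--         return 'netral'
-- ===== SOURCE B (Python) =====
-- def analyze_aspect_sentiment(text, aspect_keywords, positive_words, negative_words):
--     """Analisis sentimen untuk aspek tertentu (single pass, precomputed lookups)"""
--     words = text.split()
--     counts = {}
--     for k in aspect_keywords:
--         counts[k] = counts.get(k, 0) + 1
--     pos_set = set(positive_words)
--     neg_set = set(negative_words)
--     pos = neg = neu = 0
--     for i, w in enumerate(words):
--         m = counts.get(w, 0)
--         if m:
--             window = words[max(0, i - 5):i + 6]
--             p = sum(1 for x in window if x in pos_set)
--             n = sum(1 for x in window if x in neg_set)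
--             if p > n:
--                 pos += m
--             elif n > p:
--                 neg += m
--             else:
--                 neu += m
--     if pos > neg and pos >= neu:
--         return 'positif'
--     if neg > pos and neg >= neu:
--         return 'negatif'
--     return 'netral'
-- ===== Notes on version B (the rewrite author's own statement) =====
-- stated objective: alternative
-- what changed: Replaces A's per-keyword rescans of the word list (and its join/re-split of each context window plus list-membership tests) by a single enumerate pass over the words with a pre-built keyword multiplicity dict and positive/negative word sets, accumulating the three window-sentiment tallies directly.
import Mathlib
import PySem

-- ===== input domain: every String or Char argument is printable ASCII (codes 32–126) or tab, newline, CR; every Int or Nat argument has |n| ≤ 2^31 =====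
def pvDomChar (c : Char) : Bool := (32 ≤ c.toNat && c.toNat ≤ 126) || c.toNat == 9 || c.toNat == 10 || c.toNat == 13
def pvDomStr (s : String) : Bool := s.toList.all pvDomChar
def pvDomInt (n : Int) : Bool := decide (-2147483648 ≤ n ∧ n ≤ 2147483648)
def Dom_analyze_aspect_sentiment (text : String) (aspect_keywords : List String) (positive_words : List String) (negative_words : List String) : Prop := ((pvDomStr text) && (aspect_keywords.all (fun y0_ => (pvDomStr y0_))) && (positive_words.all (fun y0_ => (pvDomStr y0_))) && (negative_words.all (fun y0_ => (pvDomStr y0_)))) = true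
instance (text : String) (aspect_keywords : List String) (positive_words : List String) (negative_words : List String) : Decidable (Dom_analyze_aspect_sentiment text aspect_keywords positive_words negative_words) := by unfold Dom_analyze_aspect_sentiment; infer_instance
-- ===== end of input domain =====

-- B replaces A's keyword-by-keyword rescans of the word list by ONE pass over the words with a
-- pre-built keyword multiplicity dict and membership sets (objective: alternative algorithm).

-- ===== PORT A =====
def analyze_aspect_sentiment (text : String) (aspect_keywords : List String) (positive_words : List String) (negative_words : List String) : String :=
  let words := PySem.Str.split₀ text
  let windows : List String :=
    aspect_keywords.foldl (fun windows keyword =>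
      if words.contains keyword then
        (PySem.List.enumerate words).foldl (fun windows iw =>
          if iw.2 == keyword then
            windows ++ [PySem.Str.join " " (PySem.List.slice words (some (max 0 (iw.1 - 5))) (some (min (words.length : Int) (iw.1 + 6))))]
          else windows) windows
      else windows) []
  let sentiments : List String :=
    windows.foldl (fun sentiments window =>
      let window_words := PySem.Str.split₀ window
      let pos_count : Int := (window_words.map (fun word => if positive_words.contains word then (1 : Int) else 0)).sum
      let neg_count : Int := (window_words.map (fun word => if negative_words.contains word then (1 : Int) else 0)).sum
      if pos_count > neg_count then sentiments ++ ["positif"]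
      else if neg_count > pos_count then sentiments ++ ["negatif"]
      else sentiments ++ ["netral"]) []
  if sentiments.isEmpty then "netral"
  else
    let pos_count : Int := sentiments.count "positif"
    let neg_count : Int := sentiments.count "negatif"
    let neu_count : Int := sentiments.count "netral"
    if pos_count > neg_count ∧ pos_count ≥ neu_count then "positif"
    else if neg_count > pos_count ∧ neg_count ≥ neu_count then "negatif"
    else "netral"

-- ===== PORT B =====
def analyze_aspect_sentiment_alt (text : String) (aspect_keywords : List String) (positive_words : List String) (negative_words : List String) : String :=
  let words := PySem.Str.split₀ text
  let counts : PySem.Dict String Int :=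
    aspect_keywords.foldl (fun d k => d.insert k (d.getD k 0 + 1)) PySem.Dict.empty
  let pos_set : PySem.Set String := PySem.Set.ofList positive_words
  let neg_set : PySem.Set String := PySem.Set.ofList negative_words
  let t : Int × Int × Int :=
    (PySem.List.enumerate words).foldl (fun (s : Int × Int × Int) iw =>
      let m := counts.getD iw.2 0
      if m ≠ 0 then
        let window := PySem.List.slice words (some (max 0 (iw.1 - 5))) (some (iw.1 + 6))
        let p : Int := (window.map (fun x => if pos_set.contains x then (1 : Int) else 0)).sum
        let n : Int := (window.map (fun x => if neg_set.contains x then (1 : Int) else 0)).sum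
        if p > n then (s.1 + m, s.2.1, s.2.2)
        else if n > p then (s.1, s.2.1 + m, s.2.2)
        else (s.1, s.2.1, s.2.2 + m)
      else s) (0, 0, 0)
  if t.1 > t.2.1 ∧ t.1 ≥ t.2.2 then "positif"
  else if t.2.1 > t.1 ∧ t.2.1 ≥ t.2.2 then "negatif"
  else "netral"

-- ===== PRECONDITION & SPEC =====
def Spec_analyze_aspect_sentiment (text : String) (aspect_keywords : List String) (positive_words : List String) (negative_words : List String) (out : String) : Prop := out = analyze_aspect_sentiment_alt text aspect_keywords positive_words negative_words
instance (text : String) (aspect_keywords : List String) (positive_words : List String) (negative_words : List String) (out : String) : Decidable (Spec_analyze_aspect_sentiment text aspect_keywords positive_words negative_words out) := by unfold Spec_analyze_aspect_sentiment; infer_instance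

-- ===== CLAIM (what is proved, stated in full; the proofs are below) =====
def Claim_equal_analyze_aspect_sentiment : Prop := ∀ (text : String) (aspect_keywords : List String) (positive_words : List String) (negative_words : List String), Dom_analyze_aspect_sentiment text aspect_keywords positive_words negative_words → Spec_analyze_aspect_sentiment text aspect_keywords positive_words negative_words (analyze_aspect_sentiment text aspect_keywords positive_words negative_words)

-- ===== LEMMAS AND PROOFS =====

-- reference quantities shared by the two proofs
def pvPosc (pw ws : List String) : Int := (ws.map (fun w => if pw.contains w then (1 : Int) else 0)).sum
def pvWnd (words : List String) (i : Int) : List String :=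
  PySem.List.slice words (some (max 0 (i - 5))) (some (min (words.length : Int) (i + 6)))
def pvCls (pw nw words : List String) (i : Int) : String :=
  if pvPosc pw (pvWnd words i) > pvPosc nw (pvWnd words i) then "positif"
  else if pvPosc nw (pvWnd words i) > pvPosc pw (pvWnd words i) then "negatif"
  else "netral"

def pvGood (w : List Char) : Prop := w ≠ [] ∧ ∀ c ∈ w, PySem.Chars.isspace c = false

-- every word produced by split₀ is nonempty and whitespace-free
theorem pv_go_good (s : List Char) (cur : List Char) (acc : List (List Char))
    (hacc : ∀ w ∈ acc, pvGood w) (hcur : ∀ c ∈ cur, PySem.Chars.isspace c = false) :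
    ∀ w ∈ PySem.Chars.split₀.go s cur acc, pvGood w := by
  induction s generalizing cur acc with
  | nil =>
    intro w hw
    unfold PySem.Chars.split₀.go at hw
    by_cases hc : cur.isEmpty
    · rw [if_pos hc] at hw
      exact hacc _ (by simpa using hw)
    · rw [if_neg hc] at hw
      rcases (by simpa using hw : w ∈ acc ∨ w = cur.reverse) with h | h
      · exact hacc _ h
      · subst h
        refine ⟨by simpa [List.isEmpty_iff] using hc, ?_⟩
        intro c hcmem; exact hcur c (by simpa using hcmem)
  | cons c rest ih =>
    intro w hw
    unfold PySem.Chars.split₀.go at hw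
    by_cases hs : PySem.Chars.isspace c
    · rw [if_pos hs] at hw
      by_cases hc : cur.isEmpty
      · rw [if_pos hc] at hw
        exact ih [] acc hacc (by simp) w hw
      · rw [if_neg hc] at hw
        refine ih [] (cur.reverse :: acc) ?_ (by simp) w hw
        intro v hv
        rcases List.mem_cons.1 hv with hv | hv
        · subst hv
          refine ⟨by simpa [List.isEmpty_iff] using hc, ?_⟩
          intro d hd; exact hcur d (by simpa using hd)
        · exact hacc _ hv
    · rw [if_neg hs] at hw
      refine ih (c :: cur) acc hacc ?_ w hw
      intro d hd
      rcases List.mem_cons.1 hd with hd | hd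
      · simpa [hd] using hs
      · exact hcur d hd

theorem pv_split_good (s : List Char) : ∀ w ∈ PySem.Chars.split₀ s, pvGood w := by
  unfold PySem.Chars.split₀
  exact pv_go_good s [] [] (by simp) (by simp)

-- consuming a whitespace-free block
theorem pv_go_block (w : List Char) (hw : ∀ c ∈ w, PySem.Chars.isspace c = false) :
    ∀ (s cur : List Char) (acc : List (List Char)),
      PySem.Chars.split₀.go (w ++ s) cur acc = PySem.Chars.split₀.go s (w.reverse ++ cur) acc := by
  induction w with
  | nil => intro s cur acc; simp
  | cons c t ih =>
    intro s cur acc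
    have hc : PySem.Chars.isspace c = false := hw c (by simp)
    have ht : ∀ d ∈ t, PySem.Chars.isspace d = false := fun d hd => hw d (by simp [hd])
    have step : PySem.Chars.split₀.go (c :: (t ++ s)) cur acc
        = PySem.Chars.split₀.go (t ++ s) (c :: cur) acc := by
      conv_lhs => unfold PySem.Chars.split₀.go
      simp [hc]
    calc PySem.Chars.split₀.go ((c :: t) ++ s) cur acc
        = PySem.Chars.split₀.go (t ++ s) (c :: cur) acc := step
      _ = PySem.Chars.split₀.go s (t.reverse ++ (c :: cur)) acc := ih ht s (c :: cur) acc
      _ = PySem.Chars.split₀.go s ((c :: t).reverse ++ cur) acc := by simp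

-- split₀ (join " " ws) = ws for good words
theorem pv_go_join (ws : List (List Char)) (hws : ∀ w ∈ ws, pvGood w) (acc : List (List Char)) :
    PySem.Chars.split₀.go (List.intercalate [' '] ws) [] acc = acc.reverse ++ ws := by
  induction ws generalizing acc with
  | nil =>
    unfold PySem.Chars.split₀.go
    simp [List.intercalate]
  | cons w ws ih =>
    rcases hws w (by simp) with ⟨hne, hnsp⟩
    cases ws with
    | nil =>
      rw [show List.intercalate [' '] [w] = w ++ [] by simp [List.intercalate]]
      rw [pv_go_block w hnsp [] [] acc]
      unfold PySem.Chars.split₀.go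
      simp [hne]
    | cons w' ws' =>
      have hint : List.intercalate [' '] (w :: w' :: ws') = w ++ (' ' :: List.intercalate [' '] (w' :: ws')) := by
        simp [List.intercalate, List.intersperse]
      rw [hint, pv_go_block w hnsp _ [] acc]
      have step : PySem.Chars.split₀.go (' ' :: List.intercalate [' '] (w' :: ws')) (w.reverse ++ []) acc
          = PySem.Chars.split₀.go (List.intercalate [' '] (w' :: ws')) [] (w :: acc) := by
        conv_lhs => unfold PySem.Chars.split₀.go
        simp [show PySem.Chars.isspace ' ' = true from rfl, hne]
      rw [step, ih (fun v hv => hws v (by simp [hv])) (w :: acc)]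
      simp

theorem pv_roundtrip (parts : List String) (h : ∀ w ∈ parts, pvGood w.toList) :
    PySem.Str.split₀ (PySem.Str.join " " parts) = parts := by
  unfold PySem.Str.split₀
  rw [PySem.Str.toList_join]
  have hj : PySem.Chars.join " ".toList (parts.map String.toList)
      = List.intercalate [' '] (parts.map String.toList) := rfl
  rw [hj]
  unfold PySem.Chars.split₀
  rw [pv_go_join (parts.map String.toList)
    (by intro w hw; rcases List.mem_map.1 hw with ⟨v, hv, rfl⟩; exact h v hv) []]
  rw [List.reverse_nil, List.nil_append]
  have hmm : List.map String.ofList (List.map String.toList parts) = List.map id parts := by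
    rw [List.map_map]
    exact List.map_congr_left (fun v _ => String.ofList_toList)
  rw [hmm, List.map_id]

-- slice members come from the list
theorem pv_mem_slice {α : Type} (xs : List α) (a b : Option Int) :
    ∀ x ∈ PySem.List.slice xs a b, x ∈ xs := by
  intro x hx
  unfold PySem.List.slice at hx
  exact List.mem_of_mem_drop (List.mem_of_mem_take hx)

-- the stop index may also be clamped by min with the length
theorem pv_slice_min (xs : List String) (a b : Int) :
    PySem.List.slice xs (some a) (some (min (xs.length : Int) b)) = PySem.List.slice xs (some a) (some b) := by
  have hclamp : PySem.List.clampIdx xs.length (min (xs.length : Int) b) = PySem.List.clampIdx xs.length b := by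
    unfold PySem.List.clampIdx
    split_ifs <;> omega
  unfold PySem.List.slice
  dsimp only
  rw [hclamp]

-- enumerate membership facts
theorem pv_mem_enumerate (words : List String) (iw : Int × String) (h : iw ∈ PySem.List.enumerate words) :
    iw.2 ∈ words ∧ 0 ≤ iw.1 := by
  rw [PySem.List.enumerate_eq_zipIdx_map] at h
  rcases List.mem_map.1 h with ⟨⟨x, i⟩, hx, rfl⟩
  exact ⟨List.fst_mem_of_mem_zipIdx hx, by positivity⟩

-- A's window list in closed form
theorem pv_windows_shape (words : List String) (keys : List String) (init : List String) :
    keys.foldl (fun windows keyword =>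
      if words.contains keyword then
        (PySem.List.enumerate words).foldl (fun windows iw =>
          if iw.2 == keyword then
            windows ++ [PySem.Str.join " " (PySem.List.slice words (some (max 0 (iw.1 - 5))) (some (min (words.length : Int) (iw.1 + 6))))]
          else windows) windows
      else windows) init
    = init ++ keys.flatMap (fun k => ((PySem.List.enumerate words).filter (fun iw => iw.2 == k)).map
        (fun iw => PySem.Str.join " " (pvWnd words iw.1))) := by
  induction keys generalizing init with
  | nil => simp
  | cons k keys ih =>
    rw [List.foldl_cons]
    have hstep :
        (if words.contains k then
          (PySem.List.enumerate words).foldl (fun windows iw =>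
            if iw.2 == k then
              windows ++ [PySem.Str.join " " (PySem.List.slice words (some (max 0 (iw.1 - 5))) (some (min (words.length : Int) (iw.1 + 6))))]
            else windows) init
        else init)
        = init ++ ((PySem.List.enumerate words).filter (fun iw => iw.2 == k)).map
            (fun iw => PySem.Str.join " " (pvWnd words iw.1)) := by
      by_cases hc : words.contains k
      · rw [if_pos hc]
        exact PySem.List.foldl_append_if (fun iw => iw.2 == k)
          (fun iw => PySem.Str.join " " (pvWnd words iw.1)) (PySem.List.enumerate words) init
      · rw [if_neg hc]
        have hnil : ((PySem.List.enumerate words).filter (fun iw => iw.2 == k)) = [] := by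
          rw [List.filter_eq_nil_iff]
          intro iw hiw hbeq
          have hmem := (pv_mem_enumerate words iw hiw).1
          rw [eq_of_beq hbeq] at hmem
          simp only [List.contains_iff_mem] at hc
          exact hc (by exact_mod_cast hmem)
        simp [hnil]
    rw [hstep, ih, List.flatMap_cons, List.append_assoc]

-- the counter built by B
theorem pv_counter (keys : List String) (w : String) :
    (keys.foldl (fun d k => d.insert k (d.getD k 0 + 1)) (PySem.Dict.empty : PySem.Dict String Int)).getD w 0
      = (keys.count w : Int) := by
  have hfun : (fun (d : PySem.Dict String Int) k => d.insert k (d.getD k 0 + 1))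
      = (fun (d : PySem.Dict String Int) x => d.modify x 0 (fun y => y + 1)) := rfl
  rw [hfun, PySem.Dict.getD_foldl_modify_add_one]
  simp [pysem]

-- the double-counting swap
theorem pv_swap (keys : List String) (E : List (Int × String)) (f : Int × String → Bool) :
    ((keys.map (fun k => ((E.countP (fun iw => f iw && iw.2 == k)) : Int))).sum)
      = (E.map (fun iw => if f iw then (keys.count iw.2 : Int) else 0)).sum := by
  induction E with
  | nil => simp
  | cons iw E ih =>
    simp only [List.countP_cons, List.map_cons, List.sum_cons]
    have hsplit : (keys.map (fun k => (((E.countP (fun iw2 => f iw2 && iw2.2 == k)) + if (f iw && iw.2 == k) then 1 else 0 : Nat) : Int))).sum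
        = (keys.map (fun k => ((E.countP (fun iw2 => f iw2 && iw2.2 == k) : Int) + if (f iw && iw.2 == k) then (1 : Int) else 0))).sum := by
      congr 1
      apply List.map_congr_left
      intro k _
      push_cast
      split_ifs <;> simp
    rw [hsplit, PySem.List.sum_map_add_int, ih]
    have hone : (keys.map (fun k => if (f iw && iw.2 == k) then (1 : Int) else 0)).sum
        = if f iw then (keys.count iw.2 : Int) else 0 := by
      by_cases hf : f iw
      · simp only [hf, Bool.true_and]
        rw [PySem.List.sum_map_ite_one_zero (fun k => iw.2 == k) keys]
        have : List.countP (fun k => iw.2 == k) keys = keys.count iw.2 := by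
          rw [List.count_eq_countP]
          apply List.countP_congr
          intro k _
          rw [Bool.beq_comm]
        rw [this]
        simp
      · simp [hf]
    rw [hone]
    ring

-- B's fold in closed form
theorem pv_fold_triple (keys words pw nw : List String) (E : List (Int × String)) (s : Int × Int × Int) :
    E.foldl (fun (s : Int × Int × Int) iw =>
      let m := (keys.foldl (fun d k => d.insert k (d.getD k 0 + 1)) (PySem.Dict.empty : PySem.Dict String Int)).getD iw.2 0
      if m ≠ 0 then
        let window := PySem.List.slice words (some (max 0 (iw.1 - 5))) (some (iw.1 + 6))
        let p : Int := (window.map (fun x => if (PySem.Set.ofList pw).contains x then (1 : Int) else 0)).sum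
        let n : Int := (window.map (fun x => if (PySem.Set.ofList nw).contains x then (1 : Int) else 0)).sum
        if p > n then (s.1 + m, s.2.1, s.2.2)
        else if n > p then (s.1, s.2.1 + m, s.2.2)
        else (s.1, s.2.1, s.2.2 + m)
      else s) s
    = (s.1 + (E.map (fun iw => if pvCls pw nw words iw.1 == "positif" then (keys.count iw.2 : Int) else 0)).sum,
       s.2.1 + (E.map (fun iw => if pvCls pw nw words iw.1 == "negatif" then (keys.count iw.2 : Int) else 0)).sum,
       s.2.2 + (E.map (fun iw => if pvCls pw nw words iw.1 == "netral" then (keys.count iw.2 : Int) else 0)).sum) := by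
  induction E generalizing s with
  | nil => simp
  | cons iw E ih =>
    rw [List.foldl_cons, ih]
    simp only [List.map_cons, List.sum_cons]
    have hset : ∀ (l : List String) (x : String), (PySem.Set.ofList l).contains x = l.contains x := by
      intro l x
      by_cases hx : x ∈ l
      · simp [hx, (PySem.Set.mem_ofList l x).2 hx]
      · have hx2 : x ∉ PySem.Set.ofList l := fun h => hx ((PySem.Set.mem_ofList l x).1 h)
        simp [hx, hx2]
    have hw : PySem.List.slice words (some (max 0 (iw.1 - 5))) (some (iw.1 + 6)) = pvWnd words iw.1 := by
      rw [pvWnd, pv_slice_min]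
    simp only [pv_counter, hset, hw]
    by_cases hm : (keys.count iw.2 : Int) = 0
    · simp [hm]
    · simp only [ne_eq, hm, not_false_eq_true, if_true]
      have hp : ((pvWnd words iw.1).map (fun x => if pw.contains x then (1 : Int) else 0)).sum
          = pvPosc pw (pvWnd words iw.1) := rfl
      have hn : ((pvWnd words iw.1).map (fun x => if nw.contains x then (1 : Int) else 0)).sum
          = pvPosc nw (pvWnd words iw.1) := rfl
      by_cases h1 : pvPosc pw (pvWnd words iw.1) > pvPosc nw (pvWnd words iw.1)
      · rw [if_pos (by rw [hp, hn]; exact h1)]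
        have hcls : pvCls pw nw words iw.1 = "positif" := by unfold pvCls; rw [if_pos h1]
        simp only [hcls, Prod.mk.injEq]
        refine ⟨?_, ?_, ?_⟩ <;> simp <;> ring
      · by_cases h2 : pvPosc nw (pvWnd words iw.1) > pvPosc pw (pvWnd words iw.1)
        · rw [if_neg (by rw [hp, hn]; exact h1), if_pos (by rw [hp, hn]; exact h2)]
          have hcls : pvCls pw nw words iw.1 = "negatif" := by
            unfold pvCls; rw [if_neg h1, if_pos h2]
          simp only [hcls, Prod.mk.injEq]
          refine ⟨?_, ?_, ?_⟩ <;> simp <;> ring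
        · rw [if_neg (by rw [hp, hn]; exact h1), if_neg (by rw [hp, hn]; exact h2)]
          have hcls : pvCls pw nw words iw.1 = "netral" := by
            unfold pvCls; rw [if_neg h1, if_neg h2]
          simp only [hcls, Prod.mk.injEq]
          refine ⟨?_, ?_, ?_⟩ <;> simp <;> ring

-- A's sentiment loop in closed form
theorem pv_sentiments_shape (pw nw : List String) (windows : List String) (init : List String) :
    windows.foldl (fun sentiments window =>
      let window_words := PySem.Str.split₀ window
      let pos_count : Int := (window_words.map (fun word => if pw.contains word then (1 : Int) else 0)).sum
      let neg_count : Int := (window_words.map (fun word => if nw.contains word then (1 : Int) else 0)).sum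
      if pos_count > neg_count then sentiments ++ ["positif"]
      else if neg_count > pos_count then sentiments ++ ["negatif"]
      else sentiments ++ ["netral"]) init
    = init ++ windows.map (fun window =>
        if pvPosc pw (PySem.Str.split₀ window) > pvPosc nw (PySem.Str.split₀ window) then "positif"
        else if pvPosc nw (PySem.Str.split₀ window) > pvPosc pw (PySem.Str.split₀ window) then "negatif"
        else "netral") := by
  have hbody : (fun (sentiments : List String) window =>
        let window_words := PySem.Str.split₀ window
        let pos_count : Int := (window_words.map (fun word => if pw.contains word then (1 : Int) else 0)).sum
        let neg_count : Int := (window_words.map (fun word => if nw.contains word then (1 : Int) else 0)).sum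
        if pos_count > neg_count then sentiments ++ ["positif"]
        else if neg_count > pos_count then sentiments ++ ["negatif"]
        else sentiments ++ ["netral"])
      = (fun (sentiments : List String) window => sentiments ++
          [if pvPosc pw (PySem.Str.split₀ window) > pvPosc nw (PySem.Str.split₀ window) then "positif"
           else if pvPosc nw (PySem.Str.split₀ window) > pvPosc pw (PySem.Str.split₀ window) then "negatif"
           else "netral"]) := by
    funext sentiments window
    simp only [pvPosc]
    split_ifs <;> rfl
  rw [hbody, PySem.List.foldl_append_singleton_eq_map]

-- abbreviations for the common value of both ports
def pvS (text : String) (keys pw nw : List String) : List String :=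
  keys.flatMap (fun k => ((PySem.List.enumerate (PySem.Str.split₀ text)).filter (fun iw => iw.2 == k)).map
    (fun iw => pvCls pw nw (PySem.Str.split₀ text) iw.1))

def pvTot (text : String) (keys pw nw : List String) (x : String) : Int :=
  ((PySem.List.enumerate (PySem.Str.split₀ text)).map
    (fun iw => if pvCls pw nw (PySem.Str.split₀ text) iw.1 == x then (keys.count iw.2 : Int) else 0)).sum

def pvFinal (p n z : Int) : String :=
  if p > n ∧ p ≥ z then "positif" else if n > p ∧ n ≥ z then "negatif" else "netral"

theorem pv_A_eq (text : String) (keys pw nw : List String) :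
    analyze_aspect_sentiment text keys pw nw
      = if (pvS text keys pw nw).isEmpty then "netral"
        else pvFinal ((pvS text keys pw nw).count "positif") ((pvS text keys pw nw).count "negatif")
          ((pvS text keys pw nw).count "netral") := by
  unfold analyze_aspect_sentiment
  simp only []
  rw [pv_windows_shape (PySem.Str.split₀ text) keys [], List.nil_append]
  rw [pv_sentiments_shape pw nw _ [], List.nil_append]
  rw [List.map_flatMap]
  have hgood : ∀ i : Int, PySem.Str.split₀ (PySem.Str.join " " (pvWnd (PySem.Str.split₀ text) i))
      = pvWnd (PySem.Str.split₀ text) i := by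
    intro i
    apply pv_roundtrip
    intro w hw
    have hwmem : w ∈ PySem.Str.split₀ text := pv_mem_slice _ _ _ w hw
    have hmem2 : w.toList ∈ PySem.Chars.split₀ text.toList := by
      rw [← PySem.Str.split₀_map_toList text]
      exact List.mem_map_of_mem hwmem
    exact pv_split_good text.toList w.toList hmem2
  have hcongr : (fun k => List.map (fun window =>
        if pvPosc pw (PySem.Str.split₀ window) > pvPosc nw (PySem.Str.split₀ window) then "positif"
        else if pvPosc nw (PySem.Str.split₀ window) > pvPosc pw (PySem.Str.split₀ window) then "negatif"
        else "netral")
        (List.map (fun iw => PySem.Str.join " " (pvWnd (PySem.Str.split₀ text) iw.1))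
          ((PySem.List.enumerate (PySem.Str.split₀ text)).filter (fun iw => iw.2 == k))))
      = (fun k => List.map (fun iw => pvCls pw nw (PySem.Str.split₀ text) iw.1)
          ((PySem.List.enumerate (PySem.Str.split₀ text)).filter (fun iw => iw.2 == k))) := by
    funext k
    rw [List.map_map]
    apply List.map_congr_left
    intro iw _
    simp only [Function.comp_def]
    rw [hgood iw.1]
    rfl
  rw [hcongr]
  simp only [pvS, pvFinal]
  rfl

theorem pv_B_eq (text : String) (keys pw nw : List String) :
    analyze_aspect_sentiment_alt text keys pw nw
      = pvFinal (pvTot text keys pw nw "positif") (pvTot text keys pw nw "negatif")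
          (pvTot text keys pw nw "netral") := by
  unfold analyze_aspect_sentiment_alt
  simp only []
  rw [pv_fold_triple keys (PySem.Str.split₀ text) pw nw (PySem.List.enumerate (PySem.Str.split₀ text)) (0, 0, 0)]
  simp only [zero_add]
  rfl

theorem pv_count (text : String) (keys pw nw : List String) (x : String) :
    (((pvS text keys pw nw).count x : Nat) : Int) = pvTot text keys pw nw x := by
  unfold pvS pvTot
  rw [List.count_flatMap]
  have hker : ∀ k : String,
      (List.count x ∘ fun k => List.map (fun iw => pvCls pw nw (PySem.Str.split₀ text) iw.1)
        ((PySem.List.enumerate (PySem.Str.split₀ text)).filter (fun iw => iw.2 == k))) k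
      = (PySem.List.enumerate (PySem.Str.split₀ text)).countP
          (fun iw => (pvCls pw nw (PySem.Str.split₀ text) iw.1 == x) && (iw.2 == k)) := by
    intro k
    show List.count x (List.map (fun iw => pvCls pw nw (PySem.Str.split₀ text) iw.1)
        ((PySem.List.enumerate (PySem.Str.split₀ text)).filter (fun iw => iw.2 == k))) = _
    rw [List.count_eq_countP, List.countP_map, List.countP_filter]
    rfl
  rw [List.map_congr_left (fun k _ => hker k)]
  rw [← pv_swap keys (PySem.List.enumerate (PySem.Str.split₀ text))
    (fun iw => pvCls pw nw (PySem.Str.split₀ text) iw.1 == x)]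
  push_cast
  rw [List.map_map]
  rfl

-- ===== VERDICT (by name: the statement is the Claim_ definition above) =====
theorem analyze_aspect_sentiment_spec : Claim_equal_analyze_aspect_sentiment := by
  unfold Claim_equal_analyze_aspect_sentiment
  intro text keys pw nw _
  unfold Spec_analyze_aspect_sentiment
  rw [pv_A_eq, pv_B_eq]
  by_cases hS : (pvS text keys pw nw).isEmpty
  · rw [if_pos hS]
    have hnil : pvS text keys pw nw = [] := List.isEmpty_iff.1 hS
    have h0 : ∀ y, pvTot text keys pw nw y = 0 := by
      intro y
      rw [← pv_count, hnil]
      simp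
    rw [h0, h0, h0]
    unfold pvFinal
    norm_num
  · rw [if_neg hS]
    rw [← pv_count, ← pv_count, ← pv_count]
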